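/-
  THE SEGMENTS OF `DGifGetExtensionNext` (dgif_lib.c:598-624; 70 instructions; a PROTECTED frame: the byte `Buf`): the assertions
  at its cut points, the segment claims, and the COMPOSITION (segments ⇒ `DGifGetExtensionNext.spec`), proved here. The template
  is `DGifGetWord` (Gif/Spec/ReaderSegs.lean).

      unit                         addresses                                  instructions   calls
      DGifGetExtensionNext.P       109820H … 10986CH                          16             —
      DGifGetExtensionNext.1       10986CH … 1098A6H                          13             InternalRead; the checks load8, store4
      DGifGetExtensionNext.2       1098C3H … 109947H                          31             InternalRead; the checks store8, store1, store4
      DGifGetExtensionNext.E       1098A6H … 1098C3H                          10             —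

  THE FRAME: six pushes (`r15 r14 r13 r12 rbp rbx`), `sub rsp, 88`: `rsp = RA − 136` (`RA` = the entry's `rsp`); the protected
  frame's base is `RA − 120` (`[rsp + 10H]`), 64 bytes; its object `Buf` is the byte at `RA − 88` (`[rsp + 30H]`); `[rsp + 8]`
  (`RA − 128`) is a spill slot (the address `&pv.Buf` across the check call at 1098EFH). The registers of the body: `rbx = gif`,
  `r13 = Extension`, `rbp` = the shadow index `(RA − 120) >> 3`; from 109875H on `r15 = pv`; `r14b` = the length byte (segment 2
  only); `r12d` = THE RESULT (the epilogue does `mov eax, r12d`).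

  `*Extension` IS NOT INSIDE pv: segment 2 stores `&pv.Buf` to `*Extension`, then `Buf[0] = n`, then READS `*Extension` AGAIN
  (109909H) to form the buffer of the second `InternalRead`; and the post (`BlockPost`) reads `*Extension` after that call wrote
  `pv.Buf[1 …]`. `BufOK.loose` alone admits an `Extension` inside `pv.Buf` (the `pv` case of `Loose`); the precondition's
  `OutPtr.low` (`Extension + 8 ≤ 800000H`: a STACK address: with `HeapPre.base` it meets no heap object — not `pv.Buf`, not
  `gif.Error` —, with `BufOK.loose` not the cursor; every caller passes a stack object of its own frame) excludes it. Every
  assertion carries `pre`, and segment 2 takes the fact from there.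
-/
import Gif.Spec.Reader
import Gif.LabelsAt
namespace Gif.Spec
open X86 X86.User Asan ProgX.Base ProgX.Base.Spec

namespace DGifGetExtensionNext

/-- The active frames inside the body: the function's own protected frame (`base = RA − 120`), innermost. -/
abbrev framesIn (frames : List (Nat × FrameLayout)) (e : State) : List (Nat × FrameLayout) :=
  ((e.reg .rsp).toNat - 120, Gif.Frames.DGifGetExtensionNext) :: frames

/-- **IN THE BODY of `DGifGetExtensionNext`**, at the address `cut`, inside the call that was entered at the state `e` (return
address `ret`) with the function's precondition. The prologue is done. -/
structure Body (cut : Word) (H : Heap) (rest : List Obj) (frames : List (Nat × FrameLayout)) (F : Forest) (R : Rd) (u₀ e : State)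
    (ret : Word) (v : State) : Prop where
  /-- the function was entered at `e` … -/
  entry : AtEntry (conv u₀) Gif.L.DGifGetExtensionNext.entry (DGifGetExtensionNext.spec H rest frames F R).frame ret e
  /-- … with its precondition -/
  pre : (DGifGetExtensionNext.spec H rest frames F R).pre e
  /-- `*Extension` (8 bytes of a live object at or above 700000H) lies above the return-address slot: a store through
  `Extension` meets neither the function's own stack (`Buf`, the spill slot, the saved registers) nor the return address. (A
  consequence of `entry` and `pre`, stated once.) -/
  ext_above : (e.reg .rsp).toNat + 8 ≤ (e.reg .rsi).toNat
  rip : v.rip = cut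
  /-- six pushes and `sub rsp, 88` -/
  rsp : v.reg .rsp = e.reg .rsp - 136
  /-- `mov rbx, rdi`: gif -/
  rbx : v.reg .rbx = e.reg .rdi
  /-- `mov r13, rsi`: Extension -/
  r13 : v.reg .r13 = e.reg .rsi
  /-- `lea rbp, [rsp + 10H] ; shr rbp, 3`: the shadow index of the frame -/
  rbp : v.reg .rbp = (e.reg .rsp - 120) >>> 3
  /-- the saved registers, in push order (`r15 r14 r13 r12 rbp rbx`): the pops 1098B8H … 1098C0H restore them -/
  slot_r15 : v.mem.readLE (e.reg .rsp - 8) 8 = (e.reg .r15).toNat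
  slot_r14 : v.mem.readLE (e.reg .rsp - 16) 8 = (e.reg .r14).toNat
  slot_r13 : v.mem.readLE (e.reg .rsp - 24) 8 = (e.reg .r13).toNat
  slot_r12 : v.mem.readLE (e.reg .rsp - 32) 8 = (e.reg .r12).toNat
  slot_rbp : v.mem.readLE (e.reg .rsp - 40) 8 = (e.reg .rbp).toNat
  slot_rbx : v.mem.readLE (e.reg .rsp - 48) 8 = (e.reg .rbx).toNat
  /-- the return-address slot `[RA, RA + 8)` still holds `ret` (no store of the function or of a callee goes there): the `ret`
  at 1098C2H pops it -/
  slot_ra : UInt64.ofNat (v.mem.readLE (e.reg .rsp) 8) = ret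
  /-- the heap's invariant, with the function's OWN frame pushed; the clean stack ends at the body's `rsp` -/
  inv : HeapInv H rest (framesIn frames e) ((e.reg .rsp).toNat - 136) v.mem
  /-- the state invariant -/
  ok : GifOK H F R v.mem
  /-- the reader did not go back -/
  rem : rem R v.mem ≤ rem R e.mem
  /-- nothing was written but the function's stack, the 8 shadow bytes of its frame, and the contract's windows -/
  same : Mem.SameExcept
    [⟨(e.reg .rsp).toNat - 320, (e.reg .rsp).toNat⟩,
     shadowSpan ((e.reg .rsp).toNat - 120) ((e.reg .rsp).toNat - 56),
     ⟨F.pv + 88, F.pv + 344⟩,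
     ⟨(e.reg .rsi).toNat, (e.reg .rsi).toNat + 8⟩,
     ⟨F.gif + 96, F.gif + 100⟩,
     ⟨R.cur, R.cur + 8⟩] e.mem v.mem
  code : (conv u₀).code.In v.mem
  abi : (conv u₀).inv v

/-- **AFTER THE PROLOGUE** (at 10986CH, `lea rdi, [rdi + 70H]`, l.600): `Body`, and `rdi` still holds gif. -/
structure Start (H : Heap) (rest : List Obj) (frames : List (Nat × FrameLayout)) (F : Forest) (R : Rd) (u₀ e : State)
    (ret : Word) (v : State) : Prop where
  body : Body Gif.L.DGifGetExtensionNext.at_10986c H rest frames F R u₀ e ret v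
  /-- the prologue did not change `rdi` -/
  rdi : v.reg .rdi = e.reg .rdi
  /-- the prologue did not move the reader: EXACTLY (the posts count the bytes consumed from the entry; `Body.rem` alone, an
  inequality, would not give `rem + 1 = rem₀` after the first read) -/
  rem_eq : rem R v.mem = rem R e.mem

/-- **AFTER THE LENGTH BYTE** (at 1098C3H, `mov r12d, eax`, the target of the `je` of l.603): `InternalRead(gif, &Buf, 1)`
returned 1: `rax = 1` (it becomes the result), `r15 = pv` (`mov r15, [rbx + 70H]`), and the reader advanced by exactly one byte.
The value of `Buf` (the byte at `RA − 88`) is ANYTHING. -/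
structure AfterLen (H : Heap) (rest : List Obj) (frames : List (Nat × FrameLayout)) (F : Forest) (R : Rd) (u₀ e : State)
    (ret : Word) (v : State) : Prop where
  body : Body Gif.L.DGifGetExtensionNext.at_1098c3 H rest frames F R u₀ e ret v
  /-- the result of the first read -/
  rax : (v.reg .rax).toNat = 1
  /-- `Private`, loaded at 109875H -/
  r15 : (v.reg .r15).toNat = F.pv
  /-- `ReadPost` with `k = n = 1` -/
  rem_eq : rem R v.mem + 1 = rem R e.mem

/-- **BEFORE THE EPILOGUE** (at 1098A6H, the store that clears the frame's shadow): `Body`, THE RESULT IN `r12` (zero-extended: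
`mov r12d, eax` with `rax = 1`, or `mov r12d, 0`), and the contract's postcondition stated of the present memory. -/
structure Done (H : Heap) (rest : List Obj) (frames : List (Nat × FrameLayout)) (F : Forest) (R : Rd) (u₀ e : State)
    (ret : Word) (v : State) : Prop where
  body : Body Gif.L.DGifGetExtensionNext.at_1098a6 H rest frames F R u₀ e ret v
  /-- GIF_OK (1) or GIF_ERROR (0), in `r12` -/
  res : (v.reg .r12).toNat = 1 ∨ (v.reg .r12).toNat = 0
  /-- GIF_OK: the terminator (`*Extension = NULL`, one byte consumed) or a sub-block in `pv.Buf` (`1 + n` bytes consumed) -/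
  ok1 : (v.reg .r12).toNat = 1 → BlockPost F R (e.reg .rsi).toNat e v

/-- **Segment P** (the prologue, 109820H … 10986CH, 16 instructions): six pushes, `sub rsp, 88`, the two argument moves, the
frame's three header words, the shadow index, the two poison stores. -/
def SegP (Lay : Layout) (μ : Microarch) (u₀ : State) : Prop :=
  ∀ (H : Heap) (rest : List Obj) (frames : List (Nat × FrameLayout)) (F : Forest) (R : Rd) (e : State) (ret : Word),
    AtEntry (conv u₀) Gif.L.DGifGetExtensionNext.entry (DGifGetExtensionNext.spec H rest frames F R).frame ret e →
    (DGifGetExtensionNext.spec H rest frames F R).pre e →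
    ReachVia Lay μ WayInv e (Start H rest frames F R u₀ e ret)

/-- **Segment 1** (10986CH … 1098A6H, 13 instructions; l.600-606): the checked load of `gif.Private` (`r15 = pv`);
`InternalRead(gif, &Buf, 1)` into the frame's object `Buf` (`BufOK`: `LiveIn` through the own frame's object, `Loose.stack` below
the cursor, `HeapWin.offHeap`); 1: `AfterLen`; not 1: l.604, the checked store of `gif.Error`, `r12d = 0`: `Done`. -/
def Seg1 (Lay : Layout) (μ : Microarch) (u₀ : State) : Prop :=
  ∀ (H : Heap) (rest : List Obj) (frames : List (Nat × FrameLayout)) (F : Forest) (R : Rd) (e : State) (ret : Word) (v : State),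
    Start H rest frames F R u₀ e ret v →
    ReachVia Lay μ WayInv v (fun w => Done H rest frames F R u₀ e ret w ∨ AfterLen H rest frames F R u₀ e ret w)

/-- **Segment 2** (1098C3H … 109947H, 31 instructions; l.609-623): `r12d = 1`; `Buf = 0`: the checked store `*Extension = NULL`
(the first case of `BlockPost`); `Buf = n > 0`: the checked stores `*Extension = &pv.Buf` (`pv + 88`, through the spill slot) and
`pv.Buf[0] = n`, the re-load of `*Extension` (it IS `pv + 88`: `OutPtr.low` of the pre, see the header), `InternalRead(gif, pv + 89, n)`
(`BufOK`: `bufLive` with `1 + n ≤ 256`, the `pv` case of `Loose`, `HeapWin.live`), the comparison of its result with `Buf`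
re-read from the frame: equal: `k = n`, the second case of `BlockPost`; else l.615, the checked store of `gif.Error`, `r12d = 0`. -/
def Seg2 (Lay : Layout) (μ : Microarch) (u₀ : State) : Prop :=
  ∀ (H : Heap) (rest : List Obj) (frames : List (Nat × FrameLayout)) (F : Forest) (R : Rd) (e : State) (ret : Word) (v : State),
    AfterLen H rest frames F R u₀ e ret v →
    ReachVia Lay μ WayInv v (Done H rest frames F R u₀ e ret)

/-- **Segment E** (the epilogue, 1098A6H … 1098C3H, 10 instructions): the 8-byte store that clears the frame's shadow,
`mov eax, r12d`, `add rsp, 88`, six pops, `ret`. -/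
def SegE (Lay : Layout) (μ : Microarch) (u₀ : State) : Prop :=
  ∀ (H : Heap) (rest : List Obj) (frames : List (Nat × FrameLayout)) (F : Forest) (R : Rd) (e : State) (ret : Word) (v : State),
    Done H rest frames F R u₀ e ret v →
    ReachVia Lay μ WayInv v (Returned (conv u₀) (DGifGetExtensionNext.spec H rest frames F R) e ret)

/-- **The composition of `DGifGetExtensionNext`**: P, then 1, which ends before the epilogue or goes on with 2; then E. -/
theorem compose {Lay : Layout} {μ : Microarch} {u₀ : State} (hP : SegP Lay μ u₀) (h1 : Seg1 Lay μ u₀) (h2 : Seg2 Lay μ u₀)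
    (hE : SegE Lay μ u₀) :
    ∀ (H : Heap) (rest : List Obj) (frames : List (Nat × FrameLayout)) (F : Forest) (R : Rd),
      Calls Lay μ WayInv (conv u₀) Gif.L.DGifGetExtensionNext.entry (DGifGetExtensionNext.spec H rest frames F R) := by
  intro H rest frames F R e ret he hp
  refine (hP H rest frames F R e ret he hp).trans ?_
  intro v hv
  refine (h1 H rest frames F R e ret v hv).trans ?_
  intro w hw
  rcases hw with hdone | hlen
  · exact hE H rest frames F R e ret w hdone
  · refine (h2 H rest frames F R e ret w hlen).trans ?_
    intro x hx
    exact hE H rest frames F R e ret x hx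

end DGifGetExtensionNext

end Gif.Spec
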